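-- pv_equiv track=rewrite | github.com/sunboyy/shish-bot | model/output_seq2seq.py | find_dot
-- ===== SOURCE A (Python) =====
-- def find_dot(text):
--     index = -1
--     reverse_text = text[::-1]
--     for i in range(len(reverse_text)):
--         if(reverse_text[i] =='.'):
--             index = len(text)-i
--         else:
--             break
--     return index
-- ===== SOURCE B (Python) =====
-- def find_dot(text):
--     start = None
--     for i, c in enumerate(text):
--         if c == '.':
--             if start is None:
--                 start = i
--         else:
--             start = None
--     if start is None:
--         return -1
--     return start + 1
-- ===== Notes on version B (the rewrite author's own statement) =====
-- stated objective: alternative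
-- what changed: Replaces the reverse-and-scan loop with a forward single pass that maintains the start index of the current dot run as an accumulator, resetting it on any non-dot; the answer is that start plus one.
import Mathlib
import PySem

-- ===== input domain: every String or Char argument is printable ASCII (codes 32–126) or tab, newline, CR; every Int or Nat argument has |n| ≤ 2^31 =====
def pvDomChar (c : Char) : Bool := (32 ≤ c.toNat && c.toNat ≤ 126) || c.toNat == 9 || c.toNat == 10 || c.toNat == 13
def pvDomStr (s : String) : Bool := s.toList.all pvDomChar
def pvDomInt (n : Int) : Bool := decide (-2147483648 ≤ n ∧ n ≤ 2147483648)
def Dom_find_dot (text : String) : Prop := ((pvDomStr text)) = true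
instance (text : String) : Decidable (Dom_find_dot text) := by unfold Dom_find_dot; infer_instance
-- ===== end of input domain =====

-- B replaces A's reverse-and-scan loop with a forward single pass that tracks the start index of the current dot run; objective: alternative decomposition.


-- ===== PORT A =====
-- A's for-loop with break: walks the reversed characters keeping the running i and index.
def findDotLoop (l : List Char) (n : Nat) (i : Nat) (idx : Int) : Int :=
  match l with
  | [] => idx
  | c :: rest =>
    if c == '.' then findDotLoop rest n (i + 1) ((n : Int) - (i : Int))
    else idx

def find_dot (text : String) : Int :=
  -- text[::-1] on a str is the reversed character sequence
  let reverse_text := text.toList.reverse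
  findDotLoop reverse_text text.toList.length 0 (-1)

-- ===== PORT B =====
-- B's forward loop body: on '.', keep the run start (or open one at i); on anything else reset to none.
def findDotStep (start : Option Int) (p : Int × Char) : Option Int :=
  if p.2 == '.' then
    match start with
    | none => some p.1
    | some s => some s
  else none

def find_dot_alt (text : String) : Int :=
  let start := (PySem.List.enumerate text.toList 0).foldl findDotStep none
  match start with
  | none => -1
  | some s => s + 1

-- ===== PRECONDITION & SPEC =====
def Spec_find_dot (text : String) (out : Int) : Prop := out = find_dot_alt text
instance (text : String) (out : Int) : Decidable (Spec_find_dot text out) := by unfold Spec_find_dot; infer_instance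

-- ===== CLAIM (what is proved, stated in full; the proofs are below) =====
def Claim_equal_find_dot : Prop := ∀ (text : String), Dom_find_dot text → Spec_find_dot text (find_dot text)

-- ===== LEMMAS AND PROOFS =====
lemma findDotLoop_eq (l : List Char) (n i : Nat) (idx : Int) :
    findDotLoop l n i idx =
      if (l.takeWhile (fun c => c == '.')).length = 0 then idx
      else (n : Int) - (i : Int) - ((l.takeWhile (fun c => c == '.')).length : Int) + 1 := by
  induction l generalizing i idx with
  | nil => simp [findDotLoop]
  | cons c rest ih =>
    by_cases hc : c = '.'
    · subst hc
      simp only [findDotLoop, List.takeWhile, beq_self_eq_true, if_true]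
      rw [ih]
      by_cases h0 : (rest.takeWhile (fun c => c == '.')).length = 0
      · simp [h0]
      · simp only [h0, List.length_cons]
        push_cast
        ring
    · have : (c == '.') = false := by simp [hc]
      simp [findDotLoop, List.takeWhile, this]

lemma findDotScan_eq (l : List Char) (s : Int) :
    (PySem.List.enumerate l s).foldl findDotStep none =
      if (l.reverse.takeWhile (fun c => c == '.')).length = 0 then none
      else some (s + (l.length : Int) - ((l.reverse.takeWhile (fun c => c == '.')).length : Int)) := by
  induction l using List.reverseRecOn with
  | nil => simp
  | append_singleton l c ih =>
    rw [PySem.List.enumerate_append, List.foldl_append, ih]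
    by_cases hc : c = '.'
    · subst hc
      simp only [PySem.List.enumerate, List.reverse_append, List.reverse_singleton,
        List.singleton_append, List.takeWhile, beq_self_eq_true, List.length_cons,
        List.foldl_cons, List.foldl_nil]
      by_cases h0 : (l.reverse.takeWhile (fun c => c == '.')).length = 0
      · simp only [h0, if_true, findDotStep, beq_self_eq_true, List.length_append,
          List.length_singleton]
        push_cast
        ring_nf
      · simp only [h0, if_false, Nat.succ_ne_zero, findDotStep, beq_self_eq_true, if_true,
          List.length_append, List.length_singleton]
        push_cast
        ring_nf
    · have hcb : (c == '.') = false := by simp [hc]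
      simp [PySem.List.enumerate, findDotStep, hcb]

-- ===== VERDICT (by name: the statement is the Claim_ definition above) =====
theorem find_dot_spec : Claim_equal_find_dot := by
  intro text _
  unfold Spec_find_dot find_dot find_dot_alt
  rw [findDotLoop_eq, findDotScan_eq]
  set k := ((text.toList.reverse.takeWhile (fun c => c == '.')).length)
  by_cases hk : k = 0
  · simp [hk]
  · simp only [hk, if_false]
    push_cast
    ring_nf
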